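-- pv_equiv track=rewrite | github.com/Hopertz/CodingInterviewPrep | Same BSTs.py | sameBsts
-- ===== SOURCE A (Python) =====
-- def sameBsts(arrayOne, arrayTwo):
--     if len(arrayOne) != len(arrayTwo):
--         return False
--
--     if len(arrayOne) == 0 and len(arrayTwo) == 0:
--         return True
--
--     if arrayOne[0] != arrayTwo[0]:
--         return False
--
--     leftone = getSmaller(arrayOne)
--     leftTwo = getSmaller(arrayTwo)
--     rightone = getBiggerOrEqual(arrayOne)
--     rightTwo = getBiggerOrEqual(arrayTwo)
--
--     return sameBsts(leftone, leftTwo) and sameBsts(rightone, rightTwo)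
--
-- def getSmaller(array):
--     smaller = []
--     for i in range(1, len(array)):
--         if array[i] < array[0]:
--             smaller.append(array[i])
--     return smaller
--
-- def getBiggerOrEqual(array):
--     biggerOrEqual = []
--     for i in range(1, len(array)):
--         if array[i] >= array[0]:
--             biggerOrEqual.append(array[i])
--     return biggerOrEqual
-- ===== SOURCE B (Python) =====
-- def sameBsts(arrayOne, arrayTwo):
--     # Build the actual BST each array produces (as nested tuples) and compare.
--     def insert(t, x):
--         if t is None:
--             return (x, None, None)
--         v, l, r = t
--         if x < v:
--             return (v, insert(l, x), r)
--         return (v, l, insert(r, x))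
--
--     def build(arr):
--         t = None
--         for x in arr:
--             t = insert(t, x)
--         return t
--
--     return build(arrayOne) == build(arrayTwo)
-- ===== Notes on version B (the rewrite author's own statement) =====
-- stated objective: alternative
-- what changed: Instead of recursively re-partitioning both arrays with filter passes, B materialises the BST each array produces by sequential insertion (nested tuples) and compares the two trees for equality.
import Mathlib
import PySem

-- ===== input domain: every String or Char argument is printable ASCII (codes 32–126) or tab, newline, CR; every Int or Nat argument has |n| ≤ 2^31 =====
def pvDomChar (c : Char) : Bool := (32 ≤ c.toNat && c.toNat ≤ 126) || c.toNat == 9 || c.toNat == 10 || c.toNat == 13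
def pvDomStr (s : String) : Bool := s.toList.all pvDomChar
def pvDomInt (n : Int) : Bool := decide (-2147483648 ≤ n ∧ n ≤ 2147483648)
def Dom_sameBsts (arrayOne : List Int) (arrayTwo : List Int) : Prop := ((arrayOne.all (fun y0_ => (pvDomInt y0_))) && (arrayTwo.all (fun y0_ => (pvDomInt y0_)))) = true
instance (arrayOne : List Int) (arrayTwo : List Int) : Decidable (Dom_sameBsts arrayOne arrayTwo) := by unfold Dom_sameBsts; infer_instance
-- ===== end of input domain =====

-- B replaces A's recursive filter-and-recurse partitioning by explicitly building the
-- BST each array denotes (sequential insertion) and comparing the two trees (alternative).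

-- ===== PORT A =====
-- getSmaller: loop 'for i in range(1, len(array)): if array[i] < array[0]: append'
-- (pyGetD with default 0 is exact here: every index used is in range)
def getSmaller (array : List Int) : List Int :=
  (PySem.List.pyRange 1 array.length 1).foldl
    (fun acc i =>
      if PySem.List.pyGetD array i 0 < PySem.List.pyGetD array 0 0 then
        acc ++ [PySem.List.pyGetD array i 0]
      else acc) []

def getBiggerOrEqual (array : List Int) : List Int :=
  (PySem.List.pyRange 1 array.length 1).foldl
    (fun acc i =>
      if PySem.List.pyGetD array i 0 ≥ PySem.List.pyGetD array 0 0 then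
        acc ++ [PySem.List.pyGetD array i 0]
      else acc) []

lemma foldl_if_append_filter (p : Int → Prop) [DecidablePred p] :
    ∀ (t acc : List Int),
      List.foldl (fun acc v => if p v then acc ++ [v] else acc) acc t
        = acc ++ t.filter (fun v => decide (p v)) := by
  intro t
  induction t with
  | nil => simp
  | cons v t ih =>
    intro acc
    by_cases h : p v <;> simp [List.foldl_cons, h, ih]

lemma getSmaller_cons (x : Int) (t : List Int) :
    getSmaller (x :: t) = t.filter (fun y => y < x) := by
  unfold getSmaller
  have h := PySem.List.foldl_pyRange_pyGetD (xs := x :: t) (a := 1) (d := 0)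
    (f := fun acc v => if v < PySem.List.pyGetD (x :: t) 0 0 then acc ++ [v] else acc)
    (init := ([] : List Int)) (by norm_num)
  rw [show (((x :: t).length : Nat) : Int) = PySem.List.len (x :: t) from by simp [PySem.List.len]]
  rw [h]
  simp only [PySem.List.pyGetD_zero_cons, Int.toNat_one, List.drop_one, List.tail_cons]
  exact (foldl_if_append_filter (fun v => v < x) t []).trans (by simp)

lemma getBiggerOrEqual_cons (x : Int) (t : List Int) :
    getBiggerOrEqual (x :: t) = t.filter (fun y => x ≤ y) := by
  unfold getBiggerOrEqual
  have h := PySem.List.foldl_pyRange_pyGetD (xs := x :: t) (a := 1) (d := 0)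
    (f := fun acc v => if v ≥ PySem.List.pyGetD (x :: t) 0 0 then acc ++ [v] else acc)
    (init := ([] : List Int)) (by norm_num)
  rw [show (((x :: t).length : Nat) : Int) = PySem.List.len (x :: t) from by simp [PySem.List.len]]
  rw [h]
  simp only [PySem.List.pyGetD_zero_cons, Int.toNat_one, List.drop_one, List.tail_cons, ge_iff_le]
  exact (foldl_if_append_filter (fun v => x ≤ v) t []).trans (by simp)

lemma getSmaller_length_lt (x : Int) (t : List Int) :
    (getSmaller (x :: t)).length < t.length + 1 := by
  rw [getSmaller_cons]
  exact Nat.lt_succ_of_le (List.length_filter_le _ _)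

lemma getBiggerOrEqual_length_lt (x : Int) (t : List Int) :
    (getBiggerOrEqual (x :: t)).length < t.length + 1 := by
  rw [getBiggerOrEqual_cons]
  exact Nat.lt_succ_of_le (List.length_filter_le _ _)

def sameBsts (arrayOne : List Int) (arrayTwo : List Int) : Bool :=
  if arrayOne.length ≠ arrayTwo.length then false
  else if arrayOne.length = 0 ∧ arrayTwo.length = 0 then true
  else if PySem.List.pyGetD arrayOne 0 0 ≠ PySem.List.pyGetD arrayTwo 0 0 then false
  else
    sameBsts (getSmaller arrayOne) (getSmaller arrayTwo) &&
    sameBsts (getBiggerOrEqual arrayOne) (getBiggerOrEqual arrayTwo)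
termination_by arrayOne.length
decreasing_by
  · cases arrayOne with
    | nil => simp_all
    | cons x t => exact getSmaller_length_lt x t
  · cases arrayOne with
    | nil => simp_all
    | cons x t => exact getBiggerOrEqual_length_lt x t

-- ===== PORT B =====
inductive BTree : Type
  | leaf : BTree
  | node : Int → BTree → BTree → BTree
deriving DecidableEq, Repr

def insertT : BTree → Int → BTree
  | .leaf, x => .node x .leaf .leaf
  | .node v l r, x => if x < v then .node v (insertT l x) r else .node v l (insertT r x)

def buildT (arr : List Int) : BTree := arr.foldl insertT .leaf

def sameBsts_alt (arrayOne : List Int) (arrayTwo : List Int) : Bool :=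
  decide (buildT arrayOne = buildT arrayTwo)

-- ===== PRECONDITION & SPEC =====
def Spec_sameBsts (arrayOne : List Int) (arrayTwo : List Int) (out : Bool) : Prop := out = sameBsts_alt arrayOne arrayTwo
instance (arrayOne : List Int) (arrayTwo : List Int) (out : Bool) : Decidable (Spec_sameBsts arrayOne arrayTwo out) := by unfold Spec_sameBsts; infer_instance

-- ===== CLAIM (what is proved, stated in full; the proofs are below) =====
def Claim_equal_sameBsts : Prop := ∀ (arrayOne : List Int) (arrayTwo : List Int), Dom_sameBsts arrayOne arrayTwo → Spec_sameBsts arrayOne arrayTwo (sameBsts arrayOne arrayTwo)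

-- ===== LEMMAS AND PROOFS =====

def sizeT : BTree → Nat
  | .leaf => 0
  | .node _ l r => sizeT l + sizeT r + 1

lemma sizeT_insertT (t : BTree) (x : Int) : sizeT (insertT t x) = sizeT t + 1 := by
  induction t with
  | leaf => rfl
  | node v l r ihl ihr =>
    simp only [insertT]
    split <;> simp [sizeT, ihl, ihr] <;> omega

lemma sizeT_foldl (xs : List Int) : ∀ (t : BTree),
    sizeT (xs.foldl insertT t) = sizeT t + xs.length := by
  induction xs with
  | nil => simp
  | cons x xs ih =>
    intro t
    simp [List.foldl_cons, ih, sizeT_insertT]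
    omega

lemma sizeT_buildT (xs : List Int) : sizeT (buildT xs) = xs.length := by
  simp [buildT, sizeT_foldl, sizeT]

lemma foldl_insertT_node (xs : List Int) : ∀ (v : Int) (l r : BTree),
    xs.foldl insertT (.node v l r) =
      .node v ((xs.filter (fun y => y < v)).foldl insertT l)
             ((xs.filter (fun y => v ≤ y)).foldl insertT r) := by
  induction xs with
  | nil => intro v l r; rfl
  | cons x xs ih =>
    intro v l r
    by_cases hx : x < v
    · have hx' : ¬ v ≤ x := by omega
      simp [List.foldl_cons, insertT, hx, hx', ih]
    · have hx' : v ≤ x := by omega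
      simp [List.foldl_cons, insertT, hx, hx', ih]

lemma buildT_cons (x : Int) (t : List Int) :
    buildT (x :: t) =
      .node x (buildT (t.filter (fun y => y < x))) (buildT (t.filter (fun y => x ≤ y))) := by
  simp only [buildT, List.foldl_cons]
  show (t.foldl insertT (.node x .leaf .leaf)) = _
  exact foldl_insertT_node t x .leaf .leaf

lemma sameBsts_eq_alt_aux : ∀ (n : Nat) (a b : List Int), a.length = n → sameBsts a b = sameBsts_alt a b := by
  intro n
  induction n using Nat.strong_induction_on with
  | _ n ih =>
    intro a b hn
    subst hn
    rw [sameBsts]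
    by_cases hlen : a.length = b.length
    · rw [if_neg (by simpa using hlen)]
      cases a with
      | nil =>
        cases b with
        | nil =>
          rw [if_pos ⟨rfl, rfl⟩]
          simp [sameBsts_alt]
        | cons y s => exact absurd hlen (by simp)
      | cons x t =>
        cases b with
        | nil => exact absurd hlen (by simp)
        | cons y s =>
          rw [if_neg (by simp)]
          simp only [PySem.List.pyGetD_zero_cons]
          by_cases hxy : x = y
          · subst hxy
            rw [if_neg (by simp)]
            rw [getSmaller_cons, getSmaller_cons, getBiggerOrEqual_cons, getBiggerOrEqual_cons]
            have h1 := ih (t.filter (fun y => y < x)).length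
              (Nat.lt_succ_of_le (List.length_filter_le _ _))
              (t.filter (fun y => y < x)) (s.filter (fun y => y < x)) rfl
            have h2 := ih (t.filter (fun y => x ≤ y)).length
              (Nat.lt_succ_of_le (List.length_filter_le _ _))
              (t.filter (fun y => x ≤ y)) (s.filter (fun y => x ≤ y)) rfl
            rw [h1, h2]
            by_cases hL : buildT (t.filter (fun y => y < x)) = buildT (s.filter (fun y => y < x)) <;>
              by_cases hR : buildT (t.filter (fun y => x ≤ y)) = buildT (s.filter (fun y => x ≤ y)) <;>
              simp [sameBsts_alt, buildT_cons, hL, hR]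
          · rw [if_pos hxy]
            have hne : buildT (x :: t) ≠ buildT (y :: s) := by
              rw [buildT_cons, buildT_cons]
              intro h
              exact hxy (by injection h)
            simp [sameBsts_alt, hne]
    · rw [if_pos hlen]
      have hne : buildT a ≠ buildT b := by
        intro h
        apply hlen
        rw [← sizeT_buildT a, ← sizeT_buildT b, h]
      simp [sameBsts_alt, hne]

-- ===== VERDICT (by name: the statement is the Claim_ definition above) =====
theorem sameBsts_spec : Claim_equal_sameBsts := by
  intro a b _
  unfold Spec_sameBsts
  exact sameBsts_eq_alt_aux a.length a b rfl
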